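-- pv_equiv track=rewrite | github.com/typedev/DSSketch | src/dssketch/utils/patterns.py | detect_pattern_from_glyphs
-- ===== SOURCE A (Python) =====
-- from typing import List, Optional, Set
--
-- def detect_pattern_from_glyphs(glyph_names: List[str]) -> Optional[str]:
--     """Try to detect a wildcard pattern from a list of glyph names"""
--     if len(glyph_names) < 2:
--         return None
--
--     # Try to find common prefix
--     common_prefix = ""
--     for i in range(min(len(name) for name in glyph_names)):
--         char = glyph_names[0][i]
--         if all(name[i] == char for name in glyph_names):
--             common_prefix += char
--         else:
--             break
--
--     # Try to find common suffix
--     common_suffix = ""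
--     min_len = min(len(name) for name in glyph_names)
--     for i in range(1, min_len + 1):
--         char = glyph_names[0][-i]
--         if all(name[-i] == char for name in glyph_names):
--             common_suffix = char + common_suffix
--         else:
--             break
--
--     # Generate pattern if we have significant commonality
--     if len(common_prefix) >= 3:  # At least 3 chars for prefix
--         # Check if all names actually start with this prefix
--         if all(name.startswith(common_prefix) for name in glyph_names):
--             return f"{common_prefix}*"
--
--     if len(common_suffix) >= 3:  # At least 3 chars for suffix
--         # Check if all names actually end with this suffix
--         if all(name.endswith(common_suffix) for name in glyph_names):
--             return f"*{common_suffix}"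
--
--     return None
-- ===== SOURCE B (Python) =====
-- def _lcp2(a, b):
--     out = []
--     for x, y in zip(a, b):
--         if x != y:
--             break
--         out.append(x)
--     return "".join(out)
--
--
-- def detect_pattern_from_glyphs(glyph_names):
--     """Try to detect a wildcard pattern from a list of glyph names"""
--     if len(glyph_names) < 2:
--         return None
--     prefix = glyph_names[0]
--     suffix = glyph_names[0][::-1]
--     for name in glyph_names[1:]:
--         prefix = _lcp2(prefix, name)
--         suffix = _lcp2(suffix, name[::-1])
--     if len(prefix) >= 3:
--         return prefix + "*"
--     if len(suffix) >= 3: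
--         return "*" + suffix[::-1]
--     return None
-- ===== Notes on version B (the rewrite author's own statement) =====
-- stated objective: alternative
-- what changed: A scans character positions, probing every name at each index (and re-checking with startswith/endswith); B instead folds a two-string common-prefix helper over the names (on the raw and reversed strings in one pass), needing no index arithmetic and no final re-check.
import Mathlib
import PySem

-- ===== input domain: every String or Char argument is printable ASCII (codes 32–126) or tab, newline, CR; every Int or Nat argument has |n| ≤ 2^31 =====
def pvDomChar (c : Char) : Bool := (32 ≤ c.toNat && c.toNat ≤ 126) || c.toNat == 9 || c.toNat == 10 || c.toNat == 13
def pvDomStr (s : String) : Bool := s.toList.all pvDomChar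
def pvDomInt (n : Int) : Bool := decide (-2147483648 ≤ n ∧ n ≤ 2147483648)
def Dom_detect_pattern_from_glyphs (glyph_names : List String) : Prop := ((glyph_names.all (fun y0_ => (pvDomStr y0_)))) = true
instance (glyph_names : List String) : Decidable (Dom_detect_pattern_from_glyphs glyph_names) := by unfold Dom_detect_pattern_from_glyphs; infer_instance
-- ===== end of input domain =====

-- B replaces A's two index-driven scans (each probing every name at every position via all(...))
-- by one pairwise fold of a two-string common-prefix helper over the names; objective: alternative.

-- ===== PORT A =====
-- the 'for i in range(...)' prefix loop with its break, building common_prefix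
def aPrefGo (glyph_names : List String) (first : List Char) : List Int → List Char → List Char
  | [], acc => acc
  | i :: rest, acc =>
    match PySem.List.pyGet? first i with
    | some char =>
      if glyph_names.all (fun name => PySem.List.pyGet? name.toList i == some char) then
        aPrefGo glyph_names first rest (acc ++ [char])
      else acc
    | none => acc

-- the 'for i in range(1, min_len + 1)' suffix loop with its break, building common_suffix
def aSufGo (glyph_names : List String) (first : List Char) : List Int → List Char → List Char
  | [], acc => acc
  | i :: rest, acc =>
    match PySem.List.pyGet? first (-i) with
    | some char =>
      if glyph_names.all (fun name => PySem.List.pyGet? name.toList (-i) == some char) then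
        aSufGo glyph_names first rest (char :: acc)
      else acc
    | none => acc

def detect_pattern_from_glyphs (glyph_names : List String) : Option String :=
  if glyph_names.length < 2 then none
  else
    let first := (glyph_names.headD "").toList
    -- min(len(name) for name in glyph_names); nonempty here, so min? is some (getD is a totaliser)
    let minLen1 : Int := (PySem.List.min? (glyph_names.map (fun (name : String) => (name.toList.length : Int))) (fun x => x)).getD 0
    let common_prefix := aPrefGo glyph_names first (PySem.List.pyRange 0 minLen1 1) []
    let minLen2 : Int := (PySem.List.min? (glyph_names.map (fun (name : String) => (name.toList.length : Int))) (fun x => x)).getD 0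
    let common_suffix := aSufGo glyph_names first (PySem.List.pyRange 1 (minLen2 + 1) 1) []
    if 3 ≤ common_prefix.length ∧
        glyph_names.all (fun name => PySem.Chars.startswith name.toList common_prefix) then
      some (String.mk (common_prefix ++ ['*']))
    else if 3 ≤ common_suffix.length ∧
        glyph_names.all (fun name => PySem.Chars.endswith name.toList common_suffix) then
      some (String.mk ('*' :: common_suffix))
    else none

-- ===== PORT B =====
-- _lcp2: loop over zip(a, b) with a break, collecting equal chars
def lcp2Go : List (Char × Char) → List Char → List Char
  | [], out => out
  | (x, y) :: rest, out => if x != y then out else lcp2Go rest (out ++ [x])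

def lcp2 (a b : List Char) : List Char := lcp2Go (a.zip b) []

def detect_pattern_from_glyphs_alt (glyph_names : List String) : Option String :=
  if glyph_names.length < 2 then none
  else
    let first := (glyph_names.headD "").toList
    let ps := glyph_names.tail.foldl
      (fun (ps : List Char × List Char) name => (lcp2 ps.1 name.toList, lcp2 ps.2 name.toList.reverse))
      (first, first.reverse)
    if 3 ≤ ps.1.length then some (String.mk (ps.1 ++ ['*']))
    else if 3 ≤ ps.2.length then some (String.mk ('*' :: ps.2.reverse))
    else none

-- ===== PRECONDITION & SPEC =====
def Spec_detect_pattern_from_glyphs (glyph_names : List String) (out : Option String) : Prop := out = detect_pattern_from_glyphs_alt glyph_names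
instance (glyph_names : List String) (out : Option String) : Decidable (Spec_detect_pattern_from_glyphs glyph_names out) := by unfold Spec_detect_pattern_from_glyphs; infer_instance

-- ===== CLAIM (what is proved, stated in full; the proofs are below) =====
def Claim_equal_detect_pattern_from_glyphs : Prop := ∀ (glyph_names : List String), Dom_detect_pattern_from_glyphs glyph_names → Spec_detect_pattern_from_glyphs glyph_names (detect_pattern_from_glyphs glyph_names)

-- ===== LEMMAS AND PROOFS =====

-- ---- generic prefix facts ----
lemma prefix_getElem? {p l : List Char} (h : p <+: l) {j : Nat} (hj : j < p.length) :
    l[j]? = p[j]? := by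
  obtain ⟨t, rfl⟩ := h
  rw [List.getElem?_append_left hj]

lemma prefix_snoc {p l : List Char} {c : Char} (h : p <+: l) (hc : l[p.length]? = some c) :
    p ++ [c] <+: l := by
  obtain ⟨t, rfl⟩ := h
  cases t with
  | nil => simp at hc
  | cons x t =>
    simp only [List.getElem?_append_right (Nat.le_refl _), Nat.sub_self,
      List.getElem?_cons_zero, Option.some.injEq] at hc
    exact ⟨t, by simp [hc]⟩

-- ---- lcp2 characterisation ----
lemma lcp2Go_append (l : List (Char × Char)) (acc : List Char) :
    lcp2Go l acc = acc ++ lcp2Go l [] := by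
  induction l generalizing acc with
  | nil => simp [lcp2Go]
  | cons p rest ih =>
    obtain ⟨x, y⟩ := p
    by_cases h : x = y
    · subst h
      simp only [lcp2Go, bne_self_eq_false, if_neg Bool.false_ne_true]
      rw [ih (acc ++ [x]), ih ([] ++ [x])]
      simp
    · simp [lcp2Go, bne_iff_ne, h]

lemma lcp2_nil_left (b : List Char) : lcp2 [] b = [] := rfl

lemma lcp2_nil_right (a : List Char) : lcp2 a [] = [] := by
  cases a <;> rfl

lemma lcp2_cons (x y : Char) (a b : List Char) :
    lcp2 (x :: a) (y :: b) = if x = y then x :: lcp2 a b else [] := by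
  by_cases h : x = y
  · simp only [lcp2, List.zip_cons_cons, lcp2Go, h, bne_self_eq_false,
      if_neg Bool.false_ne_true, if_pos h]
    rw [lcp2Go_append]
    rfl
  · simp [lcp2, lcp2Go, bne_iff_ne, h]

lemma lcp2_prefix_left (a b : List Char) : lcp2 a b <+: a := by
  induction a generalizing b with
  | nil => simp [lcp2_nil_left]
  | cons x a ih =>
    cases b with
    | nil => simp [lcp2_nil_right]
    | cons y b =>
      rw [lcp2_cons]
      split_ifs with h
      · exact List.cons_prefix_cons.mpr ⟨rfl, ih b⟩
      · exact List.nil_prefix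

lemma lcp2_prefix_right (a b : List Char) : lcp2 a b <+: b := by
  induction a generalizing b with
  | nil => simp [lcp2_nil_left]
  | cons x a ih =>
    cases b with
    | nil => simp [lcp2_nil_right]
    | cons y b =>
      rw [lcp2_cons]
      split_ifs with h
      · subst h; exact List.cons_prefix_cons.mpr ⟨rfl, ih b⟩
      · exact List.nil_prefix

lemma prefix_lcp2 {q a b : List Char} (ha : q <+: a) (hb : q <+: b) : q <+: lcp2 a b := by
  induction q generalizing a b with
  | nil => exact List.nil_prefix
  | cons c q ih =>
    obtain ⟨ta, rfl⟩ := ha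
    obtain ⟨tb, hb'⟩ := hb
    cases b with
    | nil => simp at hb'
    | cons y b =>
      simp only [List.cons_append, List.cons.injEq] at hb'
      obtain ⟨rfl, hb2⟩ := hb'
      rw [List.cons_append, lcp2_cons, if_pos rfl]
      exact List.cons_prefix_cons.mpr ⟨rfl, ih ⟨ta, rfl⟩ ⟨tb, hb2⟩⟩

-- ---- the fold of lcp2 is the lcp of the whole collection ----
lemma foldl_lcp2_prefix_init (ns : List (List Char)) (c : List Char) :
    ns.foldl lcp2 c <+: c := by
  induction ns generalizing c with
  | nil => exact List.prefix_refl c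
  | cons n ns ih => exact (ih (lcp2 c n)).trans (lcp2_prefix_left c n)

lemma foldl_lcp2_prefix_mem {ns : List (List Char)} {n : List Char} (hn : n ∈ ns) (c : List Char) :
    ns.foldl lcp2 c <+: n := by
  induction ns generalizing c with
  | nil => cases hn
  | cons a ns ih =>
    rcases List.mem_cons.mp hn with rfl | hn
    · exact (foldl_lcp2_prefix_init ns (lcp2 c n)).trans (lcp2_prefix_right c n)
    · exact ih hn (lcp2 c a)

lemma prefix_foldl_lcp2 {q c : List Char} {ns : List (List Char)}
    (hc : q <+: c) (hns : ∀ n ∈ ns, q <+: n) : q <+: ns.foldl lcp2 c := by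
  induction ns generalizing c with
  | nil => exact hc
  | cons n ns ih =>
    exact ih (prefix_lcp2 hc (hns n List.mem_cons_self)) (fun m hm => hns m (List.mem_cons_of_mem _ hm))

-- ---- the paired fold in B computes the two folds componentwise ----
lemma foldl_pair {α : Type} (f g : List Char → α → List Char) (ns : List α) (a b : List Char) :
    ns.foldl (fun (ps : List Char × List Char) n => (f ps.1 n, g ps.2 n)) (a, b)
      = (ns.foldl f a, ns.foldl g b) := by
  induction ns generalizing a b with
  | nil => rfl
  | cons n ns ih => exact ih (f a n) (g b n)

-- ---- an abstract view of A's two loops ----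
def checkF (nss : List (List Char)) (cs : List Char) (i : Nat) : Option Char :=
  match cs[i]? with
  | some c => if nss.all (fun l => l[i]? == some c) then some c else none
  | none => none

def genGo (f : Nat → Option Char) : Nat → Nat → List Char → List Char
  | 0, _, acc => acc
  | k + 1, i, acc =>
    match f i with
    | some c => genGo f (k) (i + 1) (acc ++ [c])
    | none => acc

-- negative indexing reads the reversed list at i-1
lemma pyGet?_neg_rev (l : List Char) (i : Nat) (hi : 1 ≤ i) :
    PySem.List.pyGet? l (-(i : Int)) = l.reverse[i - 1]? := by
  by_cases h : i ≤ l.length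
  · rw [PySem.List.pyGet?_neg_natCast l i hi h]
    rw [List.getElem?_reverse (by omega)]
    congr 1
    omega
  · rw [List.getElem?_eq_none (by simp; omega)]
    rw [PySem.List.pyGet?_eq_none_iff]
    simp only [PySem.Raise.InRange]
    omega

-- A's prefix loop is genGo over the index range
lemma aPrefGo_eq_genGo (glyph_names : List String) (cs : List Char) :
    ∀ (k i : Nat) (acc : List Char),
      aPrefGo glyph_names cs ((List.range' i k).map Int.ofNat) acc
        = genGo (checkF (glyph_names.map String.toList) cs) k i acc := by
  intro k
  induction k with
  | zero => intro i acc; rfl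
  | succ k ih =>
    intro i acc
    rw [List.range'_succ, List.map_cons]
    show (match PySem.List.pyGet? cs (i : Int) with
      | some char =>
        if glyph_names.all (fun name => PySem.List.pyGet? name.toList (i : Int) == some char) then
          aPrefGo glyph_names cs ((List.range' (i+1) k).map Int.ofNat) (acc ++ [char])
        else acc
      | none => acc) = _
    rw [PySem.List.pyGet?_natCast]
    cases hcs : cs[i]? with
    | none =>
      have hck : checkF (glyph_names.map String.toList) cs i = none := by
        unfold checkF; rw [hcs]
      simp only [genGo, hck]
    | some c =>
      have hall : (glyph_names.all (fun name => PySem.List.pyGet? name.toList (i : Int) == some c))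
          = ((glyph_names.map String.toList).all (fun l => l[i]? == some c)) := by
        rw [List.all_map]
        apply congrArg
        funext n
        rw [PySem.List.pyGet?_natCast]
        rfl
      by_cases hb : ((glyph_names.map String.toList).all (fun l => l[i]? == some c)) = true
      · have hck : checkF (glyph_names.map String.toList) cs i = some c := by
          unfold checkF; rw [hcs]; simp only [hb]; rfl
        simp only [genGo, hck]
        rw [hall, if_pos hb]
        exact ih (i + 1) (acc ++ [c])
      · have hck : checkF (glyph_names.map String.toList) cs i = none := by
          unfold checkF; rw [hcs]; simp [hb]
        simp only [genGo, hck]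
        rw [hall]
        simp [hb]

-- A's suffix loop is (reversed) genGo over the reversed strings
lemma aSufGo_eq_genGo (glyph_names : List String) (cs : List Char) :
    ∀ (k i : Nat) (acc : List Char), 1 ≤ i →
      aSufGo glyph_names cs ((List.range' i k).map Int.ofNat) acc
        = (genGo (checkF ((glyph_names.map String.toList).map List.reverse) cs.reverse)
            k (i - 1) acc.reverse).reverse := by
  intro k
  induction k with
  | zero => intro i acc _; simp [aSufGo, genGo]
  | succ k ih =>
    intro i acc hi
    rw [List.range'_succ, List.map_cons]
    show (match PySem.List.pyGet? cs (-(i:Int)) with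
      | some char =>
        if glyph_names.all (fun name => PySem.List.pyGet? name.toList (-(i:Int)) == some char) then
          aSufGo glyph_names cs ((List.range' (i+1) k).map Int.ofNat) (char :: acc)
        else acc
      | none => acc) = _
    rw [pyGet?_neg_rev cs i hi]
    cases hcs : cs.reverse[i-1]? with
    | none =>
      have hck : checkF ((glyph_names.map String.toList).map List.reverse) cs.reverse (i-1) = none := by
        unfold checkF; rw [hcs]
      simp only [genGo, hck]
      simp
    | some c =>
      have hall : (glyph_names.all (fun name => PySem.List.pyGet? name.toList (-(i:Int)) == some c))
          = (((glyph_names.map String.toList).map List.reverse).all (fun l => l[i-1]? == some c)) := by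
        simp only [List.all_map, Function.comp]
        apply congrArg
        funext n
        rw [pyGet?_neg_rev n.toList i hi]
        rfl
      by_cases hb : (((glyph_names.map String.toList).map List.reverse).all (fun l => l[i-1]? == some c)) = true
      · have hck : checkF ((glyph_names.map String.toList).map List.reverse) cs.reverse (i-1) = some c := by
          unfold checkF; rw [hcs]; simp only [hb]; rfl
        simp only [genGo, hck]
        rw [hall, if_pos hb]
        have := ih (i + 1) (c :: acc) (by omega)
        rw [this]
        have h1 : i + 1 - 1 = (i - 1) + 1 := by omega
        have h2 : (c :: acc).reverse = acc.reverse ++ [c] := by simp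
        rw [h1, h2]
      · simp only [Bool.not_eq_true] at hb
        have hck : checkF ((glyph_names.map String.toList).map List.reverse) cs.reverse (i-1) = none := by
          unfold checkF; rw [hcs]; simp only [hb]; rfl
        simp only [genGo, hck]
        rw [hall, hb]
        simp

-- genGo with checkF computes the lcp of the collection
lemma genGo_spec (nss : List (List Char)) (cs : List Char) (m : Nat)
    (hcs : cs ∈ nss) (hm : ∀ l ∈ nss, m ≤ l.length) :
    ∀ (k i : Nat) (acc : List Char), i + k = m → acc.length = i → acc <+: cs →
      (∀ l ∈ nss, acc <+: l) →
      (∀ l ∈ nss, genGo (checkF nss cs) k i acc <+: l) ∧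
      (∀ q, (∀ l ∈ nss, q <+: l) → q.length ≤ m → q <+: genGo (checkF nss cs) k i acc) := by
  intro k
  induction k with
  | zero =>
    intro i acc him hlen hpcs hp
    have h0 : genGo (checkF nss cs) 0 i acc = acc := rfl
    rw [h0]
    refine ⟨fun l hl => hp l hl, fun q hq hqm => ?_⟩
    exact List.prefix_of_prefix_length_le (hq cs hcs) hpcs (by omega)
  | succ k ih =>
    intro i acc him hlen hpcs hp
    have hicm : i < cs.length := lt_of_lt_of_le (by omega) (hm cs hcs)
    have hcsi : cs[i]? = some cs[i] := List.getElem?_eq_getElem hicm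
    by_cases hb : (nss.all (fun l => l[i]? == some cs[i])) = true
    · have hck : checkF nss cs i = some cs[i] := by
        unfold checkF; rw [hcsi]; simp [hb]
      have hgen : genGo (checkF nss cs) (k + 1) i acc
          = genGo (checkF nss cs) k (i + 1) (acc ++ [cs[i]]) := by
        simp only [genGo, hck]
      rw [hgen]
      have hstep : ∀ l ∈ nss, acc ++ [cs[i]] <+: l := by
        intro l hl
        have : l[i]? = some cs[i] := eq_of_beq ((List.all_eq_true.mp hb) l hl)
        exact prefix_snoc (hp l hl) (by rw [hlen]; exact this)
      exact ih (i + 1) (acc ++ [cs[i]]) (by omega) (by simp [hlen])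
        (prefix_snoc hpcs (by rw [hlen]; exact hcsi)) hstep
    · have hck : checkF nss cs i = none := by
        unfold checkF; rw [hcsi]; simp [hb]
      have hgen : genGo (checkF nss cs) (k + 1) i acc = acc := by
        simp only [genGo, hck]
      rw [hgen]
      refine ⟨fun l hl => hp l hl, fun q hq hqm => ?_⟩
      have hqi : q.length ≤ i := by
        by_contra hcon
        push_neg at hcon
        have hqcs : cs[i]? = q[i]? := prefix_getElem? (hq cs hcs) hcon
        apply hb
        rw [List.all_eq_true]
        intro l hl
        have : l[i]? = q[i]? := prefix_getElem? (hq l hl) hcon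
        simp [this, ← hqcs, hcsi]
      exact List.prefix_of_prefix_length_le (hq cs hcs) hpcs (by omega)

-- uniqueness: the fold and the loop both compute the lcp, hence agree
lemma genGo_eq_foldl (c0 : List Char) (rest : List (List Char)) (m : Nat)
    (hm : ∀ l ∈ c0 :: rest, m ≤ l.length) (hatt : ∃ l ∈ c0 :: rest, l.length = m) :
    genGo (checkF (c0 :: rest) c0) m 0 [] = rest.foldl lcp2 c0 := by
  have hcs : c0 ∈ c0 :: rest := List.mem_cons_self
  obtain ⟨hG1, hG2⟩ := genGo_spec (c0 :: rest) c0 m hcs hm m 0 [] (by omega) rfl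
    List.nil_prefix (fun l _ => List.nil_prefix)
  obtain ⟨lm, hlm, hlmlen⟩ := hatt
  have hF1 : rest.foldl lcp2 c0 <+: c0 := foldl_lcp2_prefix_init rest c0
  have hFmem : ∀ l ∈ c0 :: rest, rest.foldl lcp2 c0 <+: l := by
    intro l hl
    rcases List.mem_cons.mp hl with rfl | hl
    · exact hF1
    · exact foldl_lcp2_prefix_mem hl c0
  have h1 : genGo (checkF (c0 :: rest) c0) m 0 [] <+: rest.foldl lcp2 c0 :=
    prefix_foldl_lcp2 (hG1 c0 hcs) (fun n hn => hG1 n (List.mem_cons_of_mem _ hn))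
  have h2 : rest.foldl lcp2 c0 <+: genGo (checkF (c0 :: rest) c0) m 0 [] :=
    hG2 _ hFmem (by rw [← hlmlen]; exact (hFmem lm hlm).length_le)
  exact h1.eq_of_length_le h2.length_le

lemma prefix_reverse_suffix {a b : List Char} (h : a <+: b.reverse) : a.reverse <:+ b := by
  obtain ⟨t, ht⟩ := h
  refine ⟨t.reverse, ?_⟩
  have h2 := congrArg List.reverse ht
  simpa using h2

-- ===== VERDICT (by name: the statement is the Claim_ definition above) =====
theorem detect_pattern_from_glyphs_spec : Claim_equal_detect_pattern_from_glyphs := by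
  intro glyph_names _
  unfold Spec_detect_pattern_from_glyphs
  match glyph_names with
  | [] => rfl
  | [n0] => rfl
  | n0 :: n1 :: rest' =>
    have hlen2 : ¬((n0 :: n1 :: rest').length < 2) := by simp
    set rest : List String := n1 :: rest' with hrestdef
    set c0 : List Char := n0.toList with hc0
    set tl : List (List Char) := rest.map String.toList with htl
    set lenf : String → Int := fun name => (name.toList.length : Int) with hlenf
    have hmin : PySem.List.min? ((n0 :: rest).map lenf) (fun x => x)
        = some ((rest.map lenf).foldl min (lenf n0)) := by
      rw [List.map_cons]
      exact PySem.List.min?_id_cons _ _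
    set mI : Int := (rest.map lenf).foldl min (lenf n0) with hmIdef
    obtain ⟨name0, hname0mem, hname0⟩ := List.mem_map.mp (PySem.List.min?_mem hmin)
    have h0le : 0 ≤ mI := by
      rw [← hname0, hlenf]
      exact Int.natCast_nonneg _
    set m : Nat := mI.toNat with hmdef
    have hmcast : (m : Int) = mI := Int.toNat_of_nonneg h0le
    have hm : ∀ l ∈ c0 :: tl, m ≤ l.length := by
      intro l hl
      have hl' : l ∈ (n0 :: rest).map String.toList := by
        rw [List.map_cons, ← hc0, ← htl]; exact hl
      obtain ⟨name, hnm, rfl⟩ := List.mem_map.mp hl'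
      have h1 := PySem.List.min?_isMin hmin (lenf name) (List.mem_map_of_mem hnm)
      simp only [hlenf] at h1
      omega
    have hatt : ∃ l ∈ c0 :: tl, l.length = m := by
      refine ⟨name0.toList, ?_, ?_⟩
      · have : name0.toList ∈ (n0 :: rest).map String.toList := List.mem_map_of_mem hname0mem
        rwa [List.map_cons, ← hc0, ← htl] at this
      · simp only [hlenf] at hname0
        omega
    have hm' : ∀ l ∈ c0.reverse :: tl.map List.reverse, m ≤ l.length := by
      intro l hl
      rcases List.mem_cons.mp hl with rfl | hl
      · simpa using hm c0 List.mem_cons_self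
      · obtain ⟨t, ht, rfl⟩ := List.mem_map.mp hl
        simpa using hm t (List.mem_cons_of_mem _ ht)
    have hatt' : ∃ l ∈ c0.reverse :: tl.map List.reverse, l.length = m := by
      obtain ⟨l, hl, hlm⟩ := hatt
      rcases List.mem_cons.mp hl with rfl | hl
      · exact ⟨c0.reverse, List.mem_cons_self, by simpa using hlm⟩
      · exact ⟨l.reverse, List.mem_cons_of_mem _ (List.mem_map_of_mem hl), by simpa using hlm⟩
    have hr0 : PySem.List.pyRange 0 mI 1 = (List.range' 0 m).map Int.ofNat := by
      rw [PySem.List.pyRange_one, ← List.range_eq_range']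
      have he : (mI - 0).toNat = m := by omega
      rw [he]
      exact List.map_congr_left (fun k _ => by simp)
    have hr1 : PySem.List.pyRange 1 (mI + 1) 1 = (List.range' 1 m).map Int.ofNat := by
      rw [PySem.List.pyRange_one, List.range'_eq_map_range, List.map_map]
      have he : (mI + 1 - 1).toNat = m := by omega
      rw [he]
      refine List.map_congr_left (fun k _ => ?_)
      simp [Function.comp]
    set P : List Char := tl.foldl lcp2 c0 with hP
    set S : List Char := (tl.map List.reverse).foldl lcp2 c0.reverse with hS
    have hAP : aPrefGo (n0 :: rest) c0 ((List.range' 0 m).map Int.ofNat) [] = P := by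
      rw [aPrefGo_eq_genGo]
      have hmc : (n0 :: rest).map String.toList = c0 :: tl := by
        rw [List.map_cons, ← hc0, ← htl]
      rw [hmc]
      exact genGo_eq_foldl c0 tl m hm hatt
    have hAS : aSufGo (n0 :: rest) c0 ((List.range' 1 m).map Int.ofNat) [] = S.reverse := by
      rw [aSufGo_eq_genGo (n0 :: rest) c0 m 1 [] (le_refl 1)]
      have hmc : ((n0 :: rest).map String.toList).map List.reverse
          = c0.reverse :: tl.map List.reverse := by
        rw [List.map_cons, ← hc0, ← htl, List.map_cons]
      rw [hmc, List.reverse_nil, Nat.sub_self]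
      rw [genGo_eq_foldl c0.reverse (tl.map List.reverse) m hm' hatt']
    have hB : rest.foldl
        (fun (ps : List Char × List Char) name => (lcp2 ps.1 name.toList, lcp2 ps.2 name.toList.reverse))
        (c0, c0.reverse) = (P, S) := by
      rw [foldl_pair (fun p (name : String) => lcp2 p name.toList)
        (fun p (name : String) => lcp2 p name.toList.reverse) rest c0 c0.reverse]
      rw [hP, hS, htl, List.map_map, List.foldl_map, List.foldl_map]
      rfl
    have hPpre : ∀ name ∈ n0 :: rest, P <+: name.toList := by
      intro name hnm
      rcases List.mem_cons.mp hnm with rfl | hnm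
      · exact foldl_lcp2_prefix_init tl c0
      · exact foldl_lcp2_prefix_mem (htl ▸ List.mem_map_of_mem hnm) c0
    have hSpre : ∀ name ∈ n0 :: rest, S <+: name.toList.reverse := by
      intro name hnm
      rcases List.mem_cons.mp hnm with rfl | hnm
      · exact foldl_lcp2_prefix_init _ _
      · refine foldl_lcp2_prefix_mem ?_ _
        exact List.mem_map_of_mem (htl ▸ List.mem_map_of_mem hnm)
    have hstart : ((n0 :: rest).all fun name => PySem.Chars.startswith name.toList P) = true := by
      rw [List.all_eq_true]
      intro name hnm
      exact (PySem.Chars.startswith_iff _ _).mpr (hPpre name hnm)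
    have hend : ((n0 :: rest).all fun name => PySem.Chars.endswith name.toList S.reverse) = true := by
      rw [List.all_eq_true]
      intro name hnm
      exact (PySem.Chars.endswith_iff _ _).mpr (prefix_reverse_suffix (hSpre name hnm))
    show detect_pattern_from_glyphs (n0 :: rest) = detect_pattern_from_glyphs_alt (n0 :: rest)
    simp only [detect_pattern_from_glyphs, detect_pattern_from_glyphs_alt, if_neg hlen2,
      List.headD_cons, List.tail_cons, ← hc0, ← hlenf, hmin, ← hmIdef, Option.getD_some,
      hr0, hr1, hAP, hAS, hB]
    by_cases h3 : 3 ≤ P.length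
    · rw [if_pos ⟨h3, hstart⟩, if_pos h3]
    · rw [if_neg (fun h => h3 h.1), if_neg h3]
      by_cases h4 : 3 ≤ S.length
      · have h4' : 3 ≤ S.reverse.length := by simpa using h4
        rw [if_pos ⟨h4', hend⟩, if_pos h4]
      · have h4' : ¬ 3 ≤ S.reverse.length := by simpa using h4
        rw [if_neg (fun h => h4' h.1), if_neg h4]
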